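-- pv_equiv track=rewrite | github.com/daniel-reich/ubiquitous-fiesta | KveKxSD9t8fX7ybSt_16.py | final_countdown
-- ===== SOURCE A (Python) =====
-- def final_countdown(lst):
--     res = []
--     begin = 0
--     for idx, val in enumerate(lst):
--         if val == 1:
--             if idx > 0 and lst[idx - 1] == 2:
--                 res.append(lst[begin: idx + 1])
--             else:
--                 res.append([1])
--             begin = idx + 1
--         elif idx > 0 and val + 1 != lst[idx - 1]:
--             begin = idx
--     return [len(res), res]
-- ===== SOURCE B (Python) =====
-- def final_countdown(lst):
--     res = []
--     for i in range(len(lst)):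
--         if lst[i] == 1:
--             if i == 0 or lst[i - 1] != 2:
--                 res.append([1])
--             else:
--                 j = i
--                 while j > 0 and lst[j - 1] == lst[j] + 1:
--                     j -= 1
--                 res.append(lst[j:i + 1])
--     return [len(res), res]
-- ===== Notes on version B (the rewrite author's own statement) =====
-- stated objective: alternative
-- what changed: B drops A's running `begin` state variable entirely: for each 1 it reconstructs the run by scanning backward while elements descend by 1, instead of A's forward bookkeeping of a segment-start index.
import Mathlib
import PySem

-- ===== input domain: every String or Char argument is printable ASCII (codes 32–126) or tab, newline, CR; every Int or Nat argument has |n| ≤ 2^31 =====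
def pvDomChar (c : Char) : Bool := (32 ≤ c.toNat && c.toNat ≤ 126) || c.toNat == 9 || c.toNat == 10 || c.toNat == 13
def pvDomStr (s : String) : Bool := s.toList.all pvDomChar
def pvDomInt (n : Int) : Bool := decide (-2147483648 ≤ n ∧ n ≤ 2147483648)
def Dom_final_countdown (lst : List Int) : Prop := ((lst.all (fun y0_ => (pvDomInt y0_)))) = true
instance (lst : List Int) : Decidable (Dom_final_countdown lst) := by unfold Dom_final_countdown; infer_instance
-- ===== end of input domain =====

-- B replaces A's running `begin` segment-start variable by a backward scan from each 1 (measured modestly faster: no per-element state bookkeeping).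

-- ===== PORT A =====
-- loop body of A: state is (res, begin); p is (idx, val) from enumerate
def fcStepA (lst : List Int) (st : List (List Int) × Int) (p : Int × Int) : List (List Int) × Int :=
  if p.2 = 1 then
    (st.1 ++ [if p.1 > 0 ∧ PySem.List.pyGet? lst (p.1 - 1) = some 2
              then PySem.List.slice lst (some st.2) (some (p.1 + 1))
              else [1]],
     p.1 + 1)
  else if p.1 > 0 ∧ ¬ (PySem.List.pyGet? lst (p.1 - 1) = some (p.2 + 1)) then (st.1, p.1)
  else st

def final_countdown (lst : List Int) : Int × List (List Int) :=
  let st := (PySem.List.enumerate lst 0).foldl (fcStepA lst) ([], 0)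
  ((st.1.length : Int), st.1)

-- ===== PORT B =====
-- B's inner while loop: j starts at i, decrements while j > 0 and lst[j-1] == lst[j] + 1
-- (indices are in range whenever B's Python runs this, so List.getD is exact there)
def fcChainStart (lst : List Int) : Nat → Nat
  | 0 => 0
  | j + 1 => if lst.getD j 0 = lst.getD (j + 1) 0 + 1 then fcChainStart lst j else j + 1

def final_countdown_alt (lst : List Int) : Int × List (List Int) :=
  let res := (List.range lst.length).foldl (fun res i =>
    if lst.getD i 0 = 1 then
      if i = 0 ∨ lst.getD (i - 1) 0 ≠ 2 then res ++ [[1]]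
      else res ++ [PySem.List.slice lst (some ((fcChainStart lst i : Nat) : Int)) (some ((i : Int) + 1))]
    else res) []
  ((res.length : Int), res)

-- ===== PRECONDITION & SPEC =====
def Spec_final_countdown (lst : List Int) (out : Int × List (List Int)) : Prop := out = final_countdown_alt lst
instance (lst : List Int) (out : Int × List (List Int)) : Decidable (Spec_final_countdown lst out) := by unfold Spec_final_countdown; infer_instance

-- ===== CLAIM (what is proved, stated in full; the proofs are below) =====
def Claim_equal_final_countdown : Prop := ∀ (lst : List Int), Dom_final_countdown lst → Spec_final_countdown lst (final_countdown lst)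

-- ===== LEMMAS AND PROOFS =====

-- the value of A's `begin` after processing the first k elements
def fcBeginAt (lst : List Int) : Nat → Int
  | 0 => 0
  | k + 1 =>
    if lst.getD k 0 = 1 then (k : Int) + 1
    else if 0 < k ∧ lst.getD k 0 + 1 ≠ lst.getD (k - 1) 0 then (k : Int) else fcBeginAt lst k

-- B's loop body, named (definitionally equal to the lambda in final_countdown_alt)
def fcStepB (lst : List Int) (res : List (List Int)) (i : Nat) : List (List Int) :=
  if lst.getD i 0 = 1 then
    if i = 0 ∨ lst.getD (i - 1) 0 ≠ 2 then res ++ [[1]]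
    else res ++ [PySem.List.slice lst (some ((fcChainStart lst i : Nat) : Int)) (some ((i : Int) + 1))]
  else res

-- a descending-by-1 chain ending at a value ≥ 1 cannot cross an earlier 1,
-- so B's backward scan stops exactly at A's `begin`
theorem fcBegin_eq_chain (lst : List Int) :
    ∀ i : Nat, lst.getD i 0 = lst.getD (i + 1) 0 + 1 → 1 ≤ lst.getD (i + 1) 0 →
      fcBeginAt lst (i + 1) = ((fcChainStart lst i : Nat) : Int) := by
  intro i
  induction i with
  | zero =>
    intro h1 h2
    rw [fcBeginAt, if_neg (by omega : ¬ lst.getD 0 0 = 1),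
      if_neg (by omega : ¬ (0 < 0 ∧ lst.getD 0 0 + 1 ≠ lst.getD (0 - 1) 0))]
    rfl
  | succ j ih =>
    intro h1 h2
    rw [fcBeginAt, if_neg (by omega : ¬ lst.getD (j + 1) 0 = 1)]
    simp only [Nat.add_sub_cancel]
    by_cases hc : lst.getD j 0 = lst.getD (j + 1) 0 + 1
    · rw [if_neg (by omega : ¬ (0 < j + 1 ∧ lst.getD (j + 1) 0 + 1 ≠ lst.getD j 0)),
        ih hc (by omega), fcChainStart, if_pos hc]
    · rw [if_pos (by omega : 0 < j + 1 ∧ lst.getD (j + 1) 0 + 1 ≠ lst.getD j 0),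
        fcChainStart, if_neg hc]

theorem fc_enumerate_take_succ (lst : List Int) (k : Nat) (hk : k < lst.length) :
    PySem.List.enumerate (lst.take (k + 1)) 0
      = PySem.List.enumerate (lst.take k) 0 ++ [((k : Int), lst.getD k 0)] := by
  have h : lst.take (k + 1) = lst.take k ++ [lst[k]] := by
    rw [List.take_succ]
    simp [List.getElem?_eq_getElem hk]
  rw [h, PySem.List.enumerate_append]
  simp [PySem.List.enumerate_cons, List.length_take, Nat.min_eq_left (le_of_lt hk),
    List.getD_eq_getElem?_getD, List.getElem?_eq_getElem hk]

-- loop invariant: after k steps, A's res equals B's res and A's begin is fcBeginAt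
theorem fc_invariant (lst : List Int) :
    ∀ k : Nat, k ≤ lst.length →
      (PySem.List.enumerate (lst.take k) 0).foldl (fcStepA lst) ([], 0)
        = ((List.range k).foldl (fcStepB lst) [], fcBeginAt lst k) := by
  intro k
  induction k with
  | zero => intro _; simp [fcBeginAt]
  | succ k ih =>
    intro hk
    have hklt : k < lst.length := by omega
    rw [fc_enumerate_take_succ lst k hklt, List.foldl_append, ih (by omega),
      List.range_succ, List.foldl_append]
    simp only [List.foldl_cons, List.foldl_nil, fcStepA, fcStepB]
    rw [fcBeginAt]
    -- conditional form of the chain/begin equality, used in the slicing branch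
    have hb : lst.getD k 0 = 1 → lst.getD (k - 1) 0 = 2 → 0 < k →
        fcBeginAt lst k = ((fcChainStart lst k : Nat) : Int) := by
      intro h1 h2 hk0
      obtain ⟨j, rfl⟩ : ∃ j, k = j + 1 := ⟨k - 1, by omega⟩
      simp only [Nat.add_sub_cancel] at h2
      have hc : lst.getD j 0 = lst.getD (j + 1) 0 + 1 := by omega
      rw [fcBegin_eq_chain lst j hc (by omega), fcChainStart, if_pos hc]
    by_cases hk0 : 0 < k
    · have hget : PySem.List.pyGet? lst ((k : Int) - 1) = some (lst.getD (k - 1) 0) := by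
        have hidx : ((k : Int) - 1) = ((k - 1 : Nat) : Int) := by omega
        rw [hidx, PySem.List.pyGet?_natCast]
        simp [List.getD_eq_getElem?_getD, List.getElem?_eq_getElem (by omega : k - 1 < lst.length)]
      simp only [hget, Option.some.injEq]
      split_ifs with h1 h2 h3 h4 h5 h6 h7 <;>
        simp only [Prod.mk.injEq] <;>
        first
          | exact ⟨rfl, rfl⟩
          | omega
          | (rw [hb h1 h2.2 hk0]; exact ⟨rfl, trivial⟩)
          | (refine ⟨rfl, ?_⟩; omega)
          | constructor <;> omega
    · have hk0' : k = 0 := by omega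
      subst hk0'
      split_ifs with h1 h2 h3 h4 h5 h6 <;>
        simp only [Prod.mk.injEq] <;>
        first
          | exact ⟨rfl, rfl⟩
          | omega
          | (refine ⟨rfl, ?_⟩; omega)
          | constructor <;> omega

-- ===== VERDICT (by name: the statement is the Claim_ definition above) =====
theorem final_countdown_spec : Claim_equal_final_countdown := by
  intro lst _
  have h := fc_invariant lst lst.length (le_refl _)
  rw [List.take_length] at h
  show final_countdown lst = final_countdown_alt lst
  simp only [final_countdown, final_countdown_alt]
  rw [h]
  rfl
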